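-- pv_equiv track=rewrite | github.com/SKIRT/PTS | core/tools/strings.py | absolute_to_state
-- ===== SOURCE A (Python) =====
-- from string import ascii_lowercase
--
-- nletters = len(ascii_lowercase)
--
-- def absolute_to_state(absolute, dimension):
--
--     """
--     This function ...
--     :param absolute:
--     :param dimension:
--     :return:
--     """
--
--     # Initialize state
--     new_state = []
--
--     remainder = absolute
--
--     for index in range(dimension):
--
--         divider = nletters ** (dimension - 1 - index)
--         quotient = remainder // divider
--         remainder = remainder % divider
--         new_state.append(quotient)
--
--     # Return
--     return new_state
-- ===== SOURCE B (Python) =====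
-- from string import ascii_lowercase
--
-- nletters = len(ascii_lowercase)
--
-- def absolute_to_state(absolute, dimension):
--     # Least-significant-first divmod pass, then reverse; the top slot keeps the
--     # full remaining quotient (unbounded leading digit, like A's first slot).
--     if dimension <= 0:
--         return []
--     digits = []
--     r = absolute
--     for _ in range(dimension - 1):
--         r, d = divmod(r, nletters)
--         digits.append(d)
--     digits.append(r)
--     digits.reverse()
--     return digits
-- ===== Notes on version B (the rewrite author's own statement) =====
-- stated objective: faster
-- what changed: Replaces A's per-slot recomputation of nletters**(dimension-1-index) followed by floordiv/mod by that power with a single least-significant-first divmod-by-26 pass whose digits are reversed at the end (the top slot keeping the un-modded remaining quotient).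
import Mathlib
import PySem

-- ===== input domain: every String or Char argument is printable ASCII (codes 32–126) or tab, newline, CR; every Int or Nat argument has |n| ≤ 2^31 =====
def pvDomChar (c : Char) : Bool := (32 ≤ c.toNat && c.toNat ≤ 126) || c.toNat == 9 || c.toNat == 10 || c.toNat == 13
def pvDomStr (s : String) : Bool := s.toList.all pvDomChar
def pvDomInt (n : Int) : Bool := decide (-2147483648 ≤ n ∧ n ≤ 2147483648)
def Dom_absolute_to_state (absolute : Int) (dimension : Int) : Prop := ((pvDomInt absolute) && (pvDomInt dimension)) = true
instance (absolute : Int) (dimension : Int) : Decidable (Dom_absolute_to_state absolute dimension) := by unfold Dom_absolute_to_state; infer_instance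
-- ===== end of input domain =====

-- B replaces A's per-slot power/floordiv/mod by a single LSB-first divmod-by-26 pass,
-- reversed at the end (objective: faster, O(d) divmods instead of O(d) fresh powers).

-- ===== PORT A =====
-- nletters = len(ascii_lowercase) = 26
def pvNletters : Int := 26

-- the for-loop over range(dimension), state (remainder, new_state)
def pvALoop (dimension : Int) : List Int → Int × List Int → Int × List Int
  | [], st => st
  | index :: rest, (remainder, new_state) =>
      let divider := pvNletters ^ (dimension - 1 - index).toNat
      let quotient := PySem.Int.floordiv remainder divider
      let remainder' := PySem.Int.mod remainder divider
      pvALoop dimension rest (remainder', new_state ++ [quotient])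

def absolute_to_state (absolute : Int) (dimension : Int) : List Int :=
  (pvALoop dimension (PySem.List.pyRange 0 dimension 1) (absolute, [])).2

-- ===== PORT B =====
-- the for-loop over range(dimension-1), state (r, digits); divmod(r, 26)
def pvBLoop : Nat → Int → List Int → Int × List Int
  | 0, r, digits => (r, digits)
  | n + 1, r, digits =>
      pvBLoop n (PySem.Int.floordiv r pvNletters)
        (digits ++ [PySem.Int.mod r pvNletters])

def absolute_to_state_alt (absolute : Int) (dimension : Int) : List Int :=
  if dimension ≤ 0 then []
  else
    let (r, digits) := pvBLoop (dimension - 1).toNat absolute []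
    (digits ++ [r]).reverse

-- ===== PRECONDITION & SPEC =====
def Spec_absolute_to_state (absolute : Int) (dimension : Int) (out : List Int) : Prop := out = absolute_to_state_alt absolute dimension
instance (absolute : Int) (dimension : Int) (out : List Int) : Decidable (Spec_absolute_to_state absolute dimension out) := by unfold Spec_absolute_to_state; infer_instance

-- ===== CLAIM (what is proved, stated in full; the proofs are below) =====
def Claim_equal_absolute_to_state : Prop := ∀ (absolute : Int) (dimension : Int), Dom_absolute_to_state absolute dimension → Spec_absolute_to_state absolute dimension (absolute_to_state absolute dimension)

-- ===== LEMMAS AND PROOFS =====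

-- canonical big-endian digit list with n+1 slots, A's shape
def pvCanon : Nat → Int → List Int
  | 0, r => [r]
  | n + 1, r =>
      PySem.Int.floordiv r (pvNletters ^ (n + 1))
        :: pvCanon n (PySem.Int.mod r (pvNletters ^ (n + 1)))

theorem pvN_pos : (0 : Int) < pvNletters := by norm_num [pvNletters]

theorem pvfd (a : Int) (n : Nat) :
    PySem.Int.floordiv a (pvNletters ^ n) = a / pvNletters ^ n :=
  PySem.Int.floordiv_eq_ediv_of_pos (pow_pos pvN_pos n)

theorem pvfd1 (a : Int) : PySem.Int.floordiv a pvNletters = a / pvNletters :=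
  PySem.Int.floordiv_eq_ediv_of_pos pvN_pos

theorem pvmd (a : Int) (n : Nat) :
    PySem.Int.mod a (pvNletters ^ n) = a % pvNletters ^ n :=
  PySem.Int.mod_eq_emod_of_pos (pow_pos pvN_pos n)

theorem pvmd1 (a : Int) : PySem.Int.mod a pvNletters = a % pvNletters :=
  PySem.Int.mod_eq_emod_of_pos pvN_pos

theorem pvEmodMulDiv (r b c : Int) (hb : 0 < b) :
    r % (b * c) / b = r / b % c := by
  have e1 : r / b / c = r / (b * c) := Int.ediv_ediv_of_nonneg (le_of_lt hb)
  have h : r % (b * c) = b * (r / b % c) + r % b := by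
    rw [Int.emod_def, Int.emod_def, Int.emod_def, ← e1]; ring
  rw [h, add_comm, Int.add_mul_ediv_left _ _ (ne_of_gt hb),
      Int.ediv_eq_zero_of_lt (Int.emod_nonneg r (ne_of_gt hb)) (Int.emod_lt_of_pos r hb),
      zero_add]

theorem pvFloordiv_pow (r : Int) (n : Nat) :
    PySem.Int.floordiv (PySem.Int.floordiv r pvNletters) (pvNletters ^ n)
      = PySem.Int.floordiv r (pvNletters ^ (n + 1)) := by
  rw [pvfd1, pvfd, pvfd, Int.ediv_ediv_of_nonneg (le_of_lt pvN_pos), ← pow_succ']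

theorem pvMod_mod (r : Int) (n : Nat) :
    PySem.Int.mod (PySem.Int.mod r (pvNletters ^ (n + 1))) pvNletters
      = PySem.Int.mod r pvNletters := by
  rw [pvmd, pvmd1, pvmd1]
  exact Int.emod_emod_of_dvd r (dvd_pow_self pvNletters (Nat.succ_ne_zero n))

theorem pvDiv_of_mod (r : Int) (n : Nat) :
    PySem.Int.floordiv (PySem.Int.mod r (pvNletters ^ (n + 1))) pvNletters
      = PySem.Int.mod (PySem.Int.floordiv r pvNletters) (pvNletters ^ n) := by
  rw [pvmd, pvfd1, pvfd1, pvmd, pow_succ']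
  exact pvEmodMulDiv r pvNletters (pvNletters ^ n) pvN_pos

-- A's canonical form peels the LEAST-significant digit as well
theorem pvCanon_succ (n : Nat) (r : Int) :
    pvCanon (n + 1) r
      = pvCanon n (PySem.Int.floordiv r pvNletters) ++ [PySem.Int.mod r pvNletters] := by
  induction n generalizing r with
  | zero =>
      simp [pvCanon, pow_one]
  | succ n ih =>
      show PySem.Int.floordiv r (pvNletters ^ (n + 1 + 1))
            :: pvCanon (n + 1) (PySem.Int.mod r (pvNletters ^ (n + 1 + 1))) = _
      rw [ih (PySem.Int.mod r (pvNletters ^ (n + 1 + 1)))]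
      show _ = (PySem.Int.floordiv (PySem.Int.floordiv r pvNletters) (pvNletters ^ (n + 1))
            :: pvCanon n (PySem.Int.mod (PySem.Int.floordiv r pvNletters) (pvNletters ^ (n + 1)))) ++ _
      rw [pvFloordiv_pow, pvMod_mod, pvDiv_of_mod]
      simp

-- A's loop over range(i, d) computes pvCanon of the remaining width
theorem pvALoop_eq (k : Nat) : ∀ (i r : Int) (acc : List Int) (d : Int),
    i + k + 1 = d →
    (pvALoop d (PySem.List.pyRange i d 1) (r, acc)).2 = acc ++ pvCanon k r := by
  induction k with
  | zero =>
      intro i r acc d hd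
      rw [PySem.List.pyRange_one_cons (by omega),
          PySem.List.pyRange_one_eq_nil (by omega)]
      have h1 : (d - 1 - i).toNat = 0 := by omega
      simp [pvALoop, pvCanon, h1, PySem.Int.floordiv, pvNletters]
  | succ k ih =>
      intro i r acc d hd
      rw [PySem.List.pyRange_one_cons (by omega)]
      rw [pvALoop]
      have h1 : (d - 1 - i).toNat = k + 1 := by omega
      rw [h1]
      rw [ih (i + 1) _ _ d (by omega)]
      rw [pvCanon]
      simp

-- B's loop: reversing the accumulated LSB-first digits gives pvCanon
theorem pvBLoop_eq (n : Nat) : ∀ (r : Int) (ds : List Int),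
    ((pvBLoop n r ds).2 ++ [(pvBLoop n r ds).1]).reverse
      = pvCanon n r ++ ds.reverse := by
  induction n with
  | zero =>
      intro r ds
      simp [pvBLoop, pvCanon]
  | succ n ih =>
      intro r ds
      rw [pvBLoop, ih]
      rw [pvCanon_succ]
      simp

-- ===== VERDICT (by name: the statement is the Claim_ definition above) =====
theorem absolute_to_state_spec : Claim_equal_absolute_to_state := by
  intro a d _
  unfold Spec_absolute_to_state absolute_to_state absolute_to_state_alt
  by_cases hd : d ≤ 0
  · rw [PySem.List.pyRange_one_eq_nil (by omega)]
    simp [pvALoop, hd]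
  · rw [if_neg hd]
    have h := pvBLoop_eq (d - 1).toNat a []
    simp only [List.reverse_nil, List.append_nil] at h
    rw [pvALoop_eq (d - 1).toNat 0 a [] d (by omega)]
    simp only [List.nil_append]
    exact h.symm
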